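-- pv_equiv track=rewrite | github.com/nitsas/codejamsolutions | Welcome to Code Jam/runme.py | count_matches_smart
-- ===== SOURCE A (Python) =====
-- def count_matches_smart(substring, string):
--     if not string:
--         return 0
--     suffix_matches_after_position = {}
--     suffix_matches_after_position[substring[-1]] = find_letter_matches_after_position(substring[-1], string)
--     for suffix in suffixes(substring, -2):
--         suffix_matches_after_position[suffix] = find_suffix_matches_after_position(suffix, string, suffix_matches_after_position[suffix[1:]])
--     return suffix_matches_after_position[substring][0]
--
-- def suffixes(string, index=-1):
--     for i in range(index, -len(string) - 1, -1):
--         yield string[i:]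
--
-- def find_letter_matches_after_position(letter, string):
--     magic = [1 for pos in range(len(string) + 1)]
--     return find_suffix_matches_after_position(letter, string, magic)
--
-- def find_suffix_matches_after_position(suffix, string, rest_pattern_matches_after_position):
--     matches_after_position = [0 for p in range(len(string))]
--     for pos in rfindall(suffix[0], string):
--         if pos + 1 < len(rest_pattern_matches_after_position):
--             matches_after_pos = rest_pattern_matches_after_position[pos + 1]
--             for i in range(pos + 1):
--                 matches_after_position[i] += matches_after_pos
--     return matches_after_position
--
-- def rfindall(substring, string):
--     pos = string.rfind(substring)
--     while pos != -1:
--         yield pos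
--         pos = string.rfind(substring, 0, pos)
-- ===== SOURCE B (Python) =====
-- def count_matches_smart(substring, string):
--     # Standard subsequence-count DP: dp[j] = number of ways substring[:j]
--     # occurs as a subsequence of the processed prefix of string.
--     dp = [1] + [0] * len(substring)
--     for ch in string:
--         dp = [1] + [b + (a if p == ch else 0)
--                     for (a, b), p in zip(zip(dp, dp[1:]), substring)]
--     return dp[-1]
-- ===== Notes on version B (the rewrite author's own statement) =====
-- stated objective: faster
-- what changed: Replaced the per-suffix dict of 'matches after each position' arrays (rebuilt by repeated rfind scans plus a prefix-increment inner loop, O(m*n^2)) with the standard one-pass subsequence-count DP that folds each character of string into a (m+1)-entry table, O(m*n).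
-- outside the precondition, e.g. on count_matches_smart('', ''): A returns 0, B returns 1
import Mathlib
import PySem

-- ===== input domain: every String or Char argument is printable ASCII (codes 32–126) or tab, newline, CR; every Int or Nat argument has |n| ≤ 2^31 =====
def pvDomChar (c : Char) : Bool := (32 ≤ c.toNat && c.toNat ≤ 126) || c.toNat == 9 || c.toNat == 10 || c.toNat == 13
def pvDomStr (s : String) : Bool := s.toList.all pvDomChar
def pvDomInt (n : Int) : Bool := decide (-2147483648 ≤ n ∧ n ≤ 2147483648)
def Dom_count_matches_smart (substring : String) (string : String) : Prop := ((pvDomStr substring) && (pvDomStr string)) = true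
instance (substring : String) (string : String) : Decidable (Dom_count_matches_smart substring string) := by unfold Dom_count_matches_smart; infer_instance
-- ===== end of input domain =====

-- B replaces A's per-suffix dict of "matches after position" arrays (O(m*n^2)) by the
-- standard one-pass subsequence-count DP (O(m*n)); equivalence of return values proved
-- for nonempty substring (empty substring raises in A, or hits an accidental 0 — see Pre_).

-- ===== PORT A =====

-- Python str.rfind(ch, 0, e) for a 1-char needle and 0 ≤ e ≤ len(s), ported by hand
-- (exact on that domain): highest index < e holding ch, else -1.
def pvRfindCharBefore (c : Char) (s : List Char) : Nat → Int
  | 0 => -1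
  | e + 1 => if s.getD e ' ' = c then (e : Int) else pvRfindCharBefore c s e

theorem pvRfindCharBefore_lt (c : Char) (s : List Char) (e : Nat)
    (h : pvRfindCharBefore c s e ≠ -1) :
    0 ≤ pvRfindCharBefore c s e ∧ (pvRfindCharBefore c s e).toNat < e := by
  induction e with
  | zero => simp [pvRfindCharBefore] at h
  | succ e ih =>
    unfold pvRfindCharBefore at h ⊢
    split
    · exact ⟨by positivity, by omega⟩
    · rename_i hne
      simp only [hne, if_false] at h
      obtain ⟨h1, h2⟩ := ih h
      exact ⟨h1, by omega⟩

-- Python generator rfindall(ch, string): descending match positions via repeated rfind.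
def pvRfindallAux (c : Char) (s : List Char) (e : Nat) : List Int :=
  let p := pvRfindCharBefore c s e
  if h : p = -1 then [] else p :: pvRfindallAux c s p.toNat
termination_by e
decreasing_by exact (pvRfindCharBefore_lt c s e h).2

def pvRfindall (c : Char) (s : List Char) : List Int :=
  pvRfindallAux c s s.length

def pvFindSuffixMatches (suffix : List Char) (s : List Char) (rest : List Int) : List Int :=
  -- matches_after_position = [0 for p in range(len(string))]
  let matches0 := (PySem.List.pyRange 0 (s.length : Int) 1).map (fun _ => (0 : Int))
  (pvRfindall (PySem.List.pyGetD suffix 0 ' ') s).foldl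
    (fun m pos =>
      if pos + 1 < (rest.length : Int) then
        let v := PySem.List.pyGetD rest (pos + 1) 0
        -- for i in range(pos + 1): matches[i] += v
        (PySem.List.pyRange 0 (pos + 1) 1).foldl
          (fun m2 i => PySem.List.pySetD m2 i (PySem.List.pyGetD m2 i 0 + v)) m
      else m)
    matches0

def pvFindLetterMatches (letter : Char) (s : List Char) : List Int :=
  let magic := (PySem.List.pyRange 0 ((s.length : Int) + 1) 1).map (fun _ => (1 : Int))
  pvFindSuffixMatches [letter] s magic

def count_matches_smart (substring : String) (string : String) : Int :=
  let sl := string.toList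
  let pl := substring.toList
  if sl = [] then 0
  else
    match PySem.List.pyGet? pl (-1) with
    | none => 0      -- substring[-1] raises IndexError (substring = ""); outside Pre_
    | some last =>
      let d0 : PySem.Dict (List Char) (List Int) :=
        (PySem.Dict.empty).insert [last] (pvFindLetterMatches last sl)
      let d := (PySem.List.pyRange (-2) (-(pl.length : Int) - 1) (-1)).foldl
        (fun d i =>
          let suffix := PySem.List.slice pl (some i) none
          d.insert suffix
            (pvFindSuffixMatches suffix sl
              (d.getD (PySem.List.slice suffix (some 1) none) [])))
        d0
      PySem.List.pyGetD (d.getD pl []) 0 0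

-- ===== PORT B =====
def count_matches_smart_alt (substring : String) (string : String) : Int :=
  let pl := substring.toList
  let dp0 : List Int := 1 :: pl.map (fun _ => (0 : Int))        -- [1] + [0]*len(substring)
  let dp := string.toList.foldl
    (fun dp ch =>
      1 :: ((dp.zip (PySem.List.slice dp (some 1) none)).zip pl).map
            (fun x => x.1.2 + if x.2 = ch then x.1.1 else 0))
    dp0
  PySem.List.pyGetD dp (-1) 0                                   -- dp[-1]

-- ===== PRECONDITION & SPEC =====
-- Pre_ excludes only substring = "": with a nonempty string A raises IndexError there
-- (substring[-1]); on ("", "") A's early exit returns 0 while the empty pattern occurs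
-- once as a subsequence — both defensible readings of a degenerate corner.
def Pre_count_matches_smart (substring : String) (string : String) : Prop :=
  substring ≠ ""
instance (substring : String) (string : String) : Decidable (Pre_count_matches_smart substring string) := by unfold Pre_count_matches_smart; infer_instance

def pvWitness_count_matches_smart : String × String := ("ab", "aabb")

def Spec_count_matches_smart (substring : String) (string : String) (out : Int) : Prop := out = count_matches_smart_alt substring string
instance (substring : String) (string : String) (out : Int) : Decidable (Spec_count_matches_smart substring string out) := by unfold Spec_count_matches_smart; infer_instance

-- ===== CLAIM (what is proved, stated in full; the proofs are below) =====
def Claim_equal_count_matches_smart : Prop := ∀ (substring : String) (string : String), Dom_count_matches_smart substring string → Pre_count_matches_smart substring string → Spec_count_matches_smart substring string (count_matches_smart substring string)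

-- ===== LEMMAS AND PROOFS =====

-- Reference function: pvCnt q t = number of occurrences of q as a subsequence of t.
def pvCnt : List Char → List Char → Int
  | [], _ => 1
  | _ :: _, [] => 0
  | p :: ps, c :: t => pvCnt (p :: ps) t + (if c = p then pvCnt ps t else 0)

theorem pvCnt_eq_zero_or_one_nil (q : List Char) :
    pvCnt q [] = if q = [] then 1 else 0 := by
  cases q <;> simp [pvCnt]

theorem pvCnt_snoc (s q1 : List Char) (p c : Char) :
    pvCnt (q1 ++ [p]) (s ++ [c]) = pvCnt (q1 ++ [p]) s + (if p = c then pvCnt q1 s else 0) := by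
  induction s generalizing q1 with
  | nil =>
    cases q1 with
    | nil =>
      by_cases h : p = c
      · simp [pvCnt, h]
      · have h' : ¬ c = p := fun hh => h hh.symm
        simp [pvCnt, h, h']
    | cons a q1' =>
      simp [pvCnt, pvCnt_eq_zero_or_one_nil]
  | cons b s' ih =>
    cases q1 with
    | nil =>
      have e : ∀ t, pvCnt [p] (b :: t) = pvCnt [p] t + (if b = p then 1 else 0) := by
        intro t; simp [pvCnt]
      simp only [List.nil_append, List.cons_append]
      have ihb := ih []
      simp only [List.nil_append] at ihb
      rw [e, e, ihb]
      by_cases h1 : b = p <;> by_cases h2 : p = c <;> simp [pvCnt, h1, h2] <;> ring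
    | cons a q1' =>
      have e : ∀ t, pvCnt (a :: (q1' ++ [p])) (b :: t)
          = pvCnt (a :: (q1' ++ [p])) t + (if b = a then pvCnt (q1' ++ [p]) t else 0) := by
        intro t; simp [pvCnt]
      have e2 : pvCnt (a :: q1') (b :: s')
          = pvCnt (a :: q1') s' + (if b = a then pvCnt q1' s' else 0) := by
        simp [pvCnt]
      have iha := ih (a :: q1')
      have ihb := ih q1'
      simp only [List.cons_append] at iha ⊢
      rw [e, e, iha, ihb, e2]
      by_cases h1 : b = a <;> by_cases h2 : p = c <;> simp [h1, h2] <;> ring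

-- the table B maintains: entry j = count of the length-j prefix of P in s
def pvTbl (P s : List Char) : List Int :=
  (List.range (P.length + 1)).map (fun j => pvCnt (P.take j) s)

theorem pvTbl_length (P s : List Char) : (pvTbl P s).length = P.length + 1 := by
  simp [pvTbl]

theorem pvTbl_nil (P : List Char) : (1 : Int) :: P.map (fun _ => (0 : Int)) = pvTbl P [] := by
  apply List.ext_getElem
  · simp [pvTbl_length]
  · intro i h1 h2
    match i with
    | 0 => simp [pvTbl, pvCnt]
    | j + 1 =>
      simp only [pvTbl, List.getElem_cons_succ, List.getElem_map, List.getElem_range]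
      rw [pvCnt_eq_zero_or_one_nil]
      have hj : j < P.length := by simpa using h1
      have : P.take (j + 1) ≠ [] := by
        apply List.ne_nil_of_length_pos
        rw [List.length_take]
        omega
      simp [this]

theorem pvStep (P s : List Char) (ch : Char) :
    (1 : Int) :: (((pvTbl P s).zip (PySem.List.slice (pvTbl P s) (some 1) none)).zip P).map
        (fun x => x.1.2 + if x.2 = ch then x.1.1 else 0) = pvTbl P (s ++ [ch]) := by
  rw [PySem.List.slice_from_one]
  apply List.ext_getElem
  · simp [pvTbl_length]
  · intro i h1 h2
    match i with
    | 0 => simp [pvTbl, pvCnt]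
    | j + 1 =>
      have hj : j < P.length := by
        simp [pvTbl_length] at h2; omega
      have hz : j < (((pvTbl P s).zip ((pvTbl P s).tail)).zip P).length := by
        simp [pvTbl_length]; omega
      simp only [List.getElem_cons_succ, List.getElem_map]
      rw [List.getElem_zip, List.getElem_zip, List.getElem_tail]
      simp only [pvTbl, List.getElem_map, List.getElem_range]
      have htake : P.take (j + 1) = P.take j ++ [P[j]] := by
        rw [List.take_succ]
        simp [List.getElem?_eq_getElem hj]
      rw [htake, pvCnt_snoc]

theorem count_B_eq_pvCnt (substring string : String) :
    count_matches_smart_alt substring string = pvCnt substring.toList string.toList := by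
  unfold count_matches_smart_alt
  have hfold : ∀ (s : List Char),
      s.foldl (fun dp ch =>
        (1 : Int) :: ((dp.zip (PySem.List.slice dp (some 1) none)).zip substring.toList).map
          (fun x => x.1.2 + if x.2 = ch then x.1.1 else 0))
        ((1 : Int) :: substring.toList.map (fun _ => (0 : Int))) = pvTbl substring.toList s := by
    intro s
    induction s using List.reverseRecOn with
    | nil => simpa using pvTbl_nil substring.toList
    | append_singleton s' c ih =>
      rw [List.foldl_append, ih]
      simpa using pvStep substring.toList s' c
  simp only [hfold]
  have hne : pvTbl substring.toList string.toList ≠ [] := by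
    intro h
    have := pvTbl_length substring.toList string.toList
    rw [h] at this; simp at this
  rw [PySem.List.pyGetD_neg_one _ _ hne, List.getLast_eq_getElem]
  simp [pvTbl]
  rw [← String.length_toList, List.take_length]

-- ---------- A-side: the suffix-array computation also produces pvCnt ----------

theorem pvRfind_none (c : Char) (s : List Char) (e : Nat)
    (h : pvRfindCharBefore c s e = -1) : ∀ p < e, s.getD p ' ' ≠ c := by
  induction e with
  | zero => omega
  | succ d ih =>
    unfold pvRfindCharBefore at h
    split at h
    · exact absurd h (by omega)
    · intro p hp
      rcases Nat.lt_succ_iff_lt_or_eq.mp hp with h1 | h1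
      · exact ih h p h1
      · subst h1; assumption

theorem pvRfind_some (c : Char) (s : List Char) (e : Nat)
    (h : pvRfindCharBefore c s e ≠ -1) :
    0 ≤ pvRfindCharBefore c s e ∧ (pvRfindCharBefore c s e).toNat < e ∧
      s.getD (pvRfindCharBefore c s e).toNat ' ' = c ∧
      ∀ p, (pvRfindCharBefore c s e).toNat < p → p < e → s.getD p ' ' ≠ c := by
  induction e with
  | zero => simp [pvRfindCharBefore] at h
  | succ d ih =>
    unfold pvRfindCharBefore at h ⊢
    split
    · rename_i hc
      refine ⟨by positivity, by omega, by simpa using hc, ?_⟩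
      intro p h1 h2
      rw [Int.toNat_natCast] at h1
      omega
    · rename_i hc
      simp only [hc, if_false] at h
      obtain ⟨h1, h2, h3, h4⟩ := ih h
      refine ⟨h1, by omega, h3, ?_⟩
      intro p hp1 hp2
      rcases Nat.lt_succ_iff_lt_or_eq.mp hp2 with h5 | h5
      · exact h4 p hp1 h5
      · subst h5; exact hc

theorem pvRfindallAux_nil (c : Char) (s : List Char) (e : Nat)
    (h : pvRfindCharBefore c s e = -1) : pvRfindallAux c s e = [] := by
  rw [pvRfindallAux]
  simp [h]

theorem pvRfindallAux_cons (c : Char) (s : List Char) (e : Nat)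
    (h : ¬ pvRfindCharBefore c s e = -1) :
    pvRfindallAux c s e
      = pvRfindCharBefore c s e :: pvRfindallAux c s (pvRfindCharBefore c s e).toNat := by
  rw [pvRfindallAux]
  simp [h]

-- partial sums of f over [i, e)
def pvTailSum (f : Nat → Int) (i : Nat) : Nat → Int
  | 0 => 0
  | e + 1 => pvTailSum f i e + (if i ≤ e then f e else 0)

theorem pvTailSum_succ (f : Nat → Int) (i e : Nat) :
    pvTailSum f i (e + 1) = pvTailSum f i e + (if i ≤ e then f e else 0) := rfl

theorem pvTailSum_of_le (f : Nat → Int) (i e : Nat) (h : e ≤ i) : pvTailSum f i e = 0 := by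
  induction e with
  | zero => rfl
  | succ d ih =>
    unfold pvTailSum
    rw [ih (by omega)]
    simp [show ¬ i ≤ d by omega]

theorem pvTailSum_peel (f : Nat → Int) (i e : Nat) (h : i < e) :
    pvTailSum f i e = f i + pvTailSum f (i + 1) e := by
  induction e with
  | zero => omega
  | succ d ih =>
    unfold pvTailSum
    rcases Nat.lt_succ_iff_lt_or_eq.mp h with h1 | h1
    · rw [ih h1, if_pos (show i ≤ d by omega), if_pos (show i + 1 ≤ d by omega)]
      ring
    · subst h1
      rw [pvTailSum_of_le f i i le_rfl, pvTailSum_of_le f (i+1) i (by omega)]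
      simp

theorem pvTailSum_congr_top (f : Nat → Int) (i : Nat) :
    ∀ e e', e' ≤ e → (∀ p, e' ≤ p → p < e → f p = 0) → pvTailSum f i e = pvTailSum f i e' := by
  intro e
  induction e with
  | zero => intro e' h _; interval_cases e'; rfl
  | succ d ih =>
    intro e' h hz
    by_cases h1 : e' = d + 1
    · rw [h1]
    · show pvTailSum f i d + (if i ≤ d then f d else 0) = pvTailSum f i e'
      rw [hz d (by omega) (by omega), ih e' (by omega) (fun p a b => hz p a (by omega))]
      simp

theorem pv_getD_set (l : List Int) (k j : Nat) (x : Int) :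
    (l.set k x).getD j 0 = if j = k ∧ k < l.length then x else l.getD j 0 := by
  simp only [List.getD_eq_getElem?_getD, List.getElem?_set]
  split_ifs with h1 h2 h3 h4 <;> simp_all <;> omega

-- the inner loop 'for i in range(k): matches[i] += v' adds v to the first k entries
theorem pvInner (v : Int) (k : Nat) (m : List Int) (hk : k ≤ m.length) :
    ((PySem.List.pyRange 0 (k : Int) 1).foldl
        (fun m2 i => PySem.List.pySetD m2 i (PySem.List.pyGetD m2 i 0 + v)) m).length = m.length ∧
    ∀ j, ((PySem.List.pyRange 0 (k : Int) 1).foldl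
        (fun m2 i => PySem.List.pySetD m2 i (PySem.List.pyGetD m2 i 0 + v)) m).getD j 0
      = m.getD j 0 + (if j < k then v else 0) := by
  induction k with
  | zero =>
    rw [show ((0:Nat):Int) = 0 by norm_num, PySem.List.pyRange_one_eq_nil le_rfl]
    simp
  | succ d ih =>
    obtain ⟨ihl, ihe⟩ := ih (by omega)
    have hrange : PySem.List.pyRange 0 ((d+1 : Nat) : Int) 1 = PySem.List.pyRange 0 (d : Nat) 1 ++ [(d : Int)] := by
      push_cast
      exact PySem.List.pyRange_one_succ_right (by positivity)
    rw [hrange, List.foldl_append]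
    set mid := (PySem.List.pyRange 0 (d : Int) 1).foldl
        (fun m2 i => PySem.List.pySetD m2 i (PySem.List.pyGetD m2 i 0 + v)) m with hmid
    have hd : d < mid.length := by omega
    have hset : PySem.List.pySetD mid (d : Int) (PySem.List.pyGetD mid (d : Int) 0 + v)
        = mid.set d (mid.getD d 0 + v) := by
      rw [PySem.List.pyGetD_natCast]
      unfold PySem.List.pySetD
      rw [PySem.List.pySet?_natCast _ _ _ hd]
      rfl
    simp only [List.foldl_cons, List.foldl_nil, hset]
    constructor
    · simp [ihl]
    · intro j
      rw [pv_getD_set]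
      by_cases hj : j = d
      · subst hj
        rw [if_pos ⟨rfl, hd⟩, ihe j, if_neg (by omega), if_pos (by omega)]
        ring
      · rw [if_neg (by tauto), ihe j]
        congr 1
        split_ifs <;> omega

-- hypothesis on 'rest': its guarded lookup at p+1 is the count of ps in s[p+1:]
def pvH (s ps : List Char) (rest : List Int) : Prop :=
  ∀ p : Nat, p < s.length →
    (if ((p : Int) + 1 < (rest.length : Int)) then PySem.List.pyGetD rest ((p : Int) + 1) 0 else 0)
      = pvCnt ps (s.drop (p + 1))

-- contribution of position p in the rfindall fold
def pvG (c : Char) (s : List Char) (ps : List Char) (rest : List Int) (p : Nat) : Int :=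
  if s.getD p ' ' = c then
    (if ((p : Int) + 1 < (rest.length : Int)) then PySem.List.pyGetD rest ((p : Int) + 1) 0 else 0)
  else 0

theorem pvFoldRfindall (c : Char) (s : List Char) (ps : List Char) (rest : List Int) :
    ∀ e, e ≤ s.length → ∀ m : List Int, m.length = s.length →
    ((pvRfindallAux c s e).foldl
        (fun m pos =>
          if pos + 1 < (rest.length : Int) then
            (PySem.List.pyRange 0 (pos + 1) 1).foldl
              (fun m2 i => PySem.List.pySetD m2 i (PySem.List.pyGetD m2 i 0 + PySem.List.pyGetD rest (pos + 1) 0)) m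
          else m) m).length = s.length ∧
    ∀ j, ((pvRfindallAux c s e).foldl
        (fun m pos =>
          if pos + 1 < (rest.length : Int) then
            (PySem.List.pyRange 0 (pos + 1) 1).foldl
              (fun m2 i => PySem.List.pySetD m2 i (PySem.List.pyGetD m2 i 0 + PySem.List.pyGetD rest (pos + 1) 0)) m
          else m) m).getD j 0 = m.getD j 0 + pvTailSum (pvG c s ps rest) j e := by
  intro e
  induction e using Nat.strong_induction_on with
  | _ e ih =>
    intro he m hm
    by_cases hp : pvRfindCharBefore c s e = -1
    · rw [pvRfindallAux_nil c s e hp]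
      simp only [List.foldl_nil]
      have hz : ∀ j, pvTailSum (pvG c s ps rest) j e = 0 := by
        intro j
        rw [pvTailSum_congr_top _ j e 0 (by omega)
          (fun p _ hpe => by unfold pvG; rw [if_neg (pvRfind_none c s e hp p hpe)])]
        rfl
      exact ⟨hm, fun j => by rw [hz j]; ring⟩
    · obtain ⟨h0, hlt, hmat, habove⟩ := pvRfind_some c s e hp
      rw [pvRfindallAux_cons c s e hp]
      simp only [List.foldl_cons]
      set p := pvRfindCharBefore c s e with hpdef
      set pt := p.toNat with hptdef
      have hpcast : p = (pt : Int) := (Int.toNat_of_nonneg h0).symm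
      -- the first step of the fold
      set gval := (if ((pt : Int) + 1 < (rest.length : Int)) then PySem.List.pyGetD rest ((pt : Int) + 1) 0 else 0) with hgval
      have hstep :
          ((if p + 1 < (rest.length : Int) then
            (PySem.List.pyRange 0 (p + 1) 1).foldl
              (fun m2 i => PySem.List.pySetD m2 i (PySem.List.pyGetD m2 i 0 + PySem.List.pyGetD rest (p + 1) 0)) m
          else m).length = m.length) ∧
          ∀ j, (if p + 1 < (rest.length : Int) then
            (PySem.List.pyRange 0 (p + 1) 1).foldl
              (fun m2 i => PySem.List.pySetD m2 i (PySem.List.pyGetD m2 i 0 + PySem.List.pyGetD rest (p + 1) 0)) m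
          else m).getD j 0 = m.getD j 0 + (if j ≤ pt then gval else 0) := by
        by_cases hL : p + 1 < (rest.length : Int)
        · have hcast : p + 1 = ((pt + 1 : Nat) : Int) := by rw [hpcast]; push_cast; ring
          rw [hcast] at hL
          obtain ⟨hl2, he2⟩ := pvInner (PySem.List.pyGetD rest ((pt + 1 : Nat) : Int) 0) (pt + 1) m (by omega)
          have hg : gval = PySem.List.pyGetD rest ((pt + 1 : Nat) : Int) 0 := by
            rw [hgval, show ((pt : Int) + 1) = ((pt + 1 : Nat) : Int) from by push_cast; ring,
              if_pos hL]
          constructor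
          · rw [hcast, if_pos hL]
            exact hl2
          · intro j
            rw [hcast, if_pos hL, he2 j, hg]
            congr 1
            split_ifs <;> omega
        · have hg : gval = 0 := by
            rw [hgval, show ((pt : Int) + 1) = p + 1 from by rw [hpcast], if_neg hL]
          constructor
          · rw [if_neg hL]
          · intro j
            rw [if_neg hL, hg]
            simp
      obtain ⟨hsl, hse⟩ := hstep
      obtain ⟨hl3, he3⟩ := ih pt hlt (by omega) _ (by rw [hsl, hm])
      refine ⟨hl3, fun j => ?_⟩
      rw [he3 j, hse j]
      have hsplit : pvTailSum (pvG c s ps rest) j e = pvTailSum (pvG c s ps rest) j (pt + 1) := by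
        apply pvTailSum_congr_top _ j e (pt + 1) (by omega)
        intro q hq1 hq2
        unfold pvG
        rw [if_neg (habove q (by omega) hq2)]
      rw [hsplit, pvTailSum_succ]
      have hgpt : pvG c s ps rest pt = gval := by
        unfold pvG
        rw [if_pos hmat, hgval]
      rw [hgpt]
      split_ifs <;> ring

theorem pvSumCnt (c : Char) (ps s : List Char) (rest : List Int) (hH : pvH s ps rest) :
    ∀ d i, i ≤ s.length → s.length - i = d →
      pvTailSum (pvG c s ps rest) i s.length = pvCnt (c :: ps) (s.drop i) := by
  intro d
  induction d with
  | zero =>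
    intro i h1 h2
    have : i = s.length := by omega
    subst this
    rw [List.drop_length, pvTailSum_of_le _ _ _ le_rfl]
    simp [pvCnt]
  | succ d ih =>
    intro i h1 h2
    have hi : i < s.length := by omega
    rw [pvTailSum_peel _ _ _ hi, ih (i + 1) (by omega) (by omega)]
    rw [List.drop_eq_getElem_cons hi]
    have hgd : s.getD i ' ' = s[i] := List.getD_eq_getElem s ' ' hi
    show pvG c s ps rest i + pvCnt (c :: ps) (List.drop (i + 1) s)
        = pvCnt (c :: ps) (List.drop (i + 1) s) + if s[i] = c then pvCnt ps (List.drop (i + 1) s) else 0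
    unfold pvG
    rw [hH i hi, hgd]
    split_ifs <;> ring

-- 'arr is the matches-after-position array for pattern q'
def pvGood (s : List Char) (q : List Char) (arr : List Int) : Prop :=
  arr.length = s.length ∧ ∀ i, i < s.length → arr.getD i 0 = pvCnt q (s.drop i)

theorem pvFSM_good (c : Char) (ps s : List Char) (rest : List Int) (hH : pvH s ps rest) :
    pvGood s (c :: ps) (pvFindSuffixMatches (c :: ps) s rest) := by
  unfold pvFindSuffixMatches pvRfindall
  rw [PySem.List.pyGetD_zero_cons]
  set m0 := (PySem.List.pyRange 0 (s.length : Int) 1).map (fun _ => (0 : Int)) with hm0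
  have hm0l : m0.length = s.length := by simp [hm0, PySem.List.length_pyRange_one]
  have hm0e : ∀ j, m0.getD j 0 = 0 := by
    intro j
    by_cases hj : j < m0.length
    · rw [List.getD_eq_getElem _ _ hj]
      simp [hm0]
    · rw [List.getD_eq_default _ _ (by omega)]
  obtain ⟨hl, he⟩ := pvFoldRfindall c s ps rest s.length le_rfl m0 hm0l
  exact ⟨hl, fun i hi => by
    rw [he i, hm0e i, pvSumCnt c ps s rest hH (s.length - i) i (by omega) rfl]; ring⟩

theorem pvGood_to_H (s q : List Char) (arr : List Int) (hq : q ≠ []) (h : pvGood s q arr) :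
    pvH s q arr := by
  obtain ⟨hlen, he⟩ := h
  intro p hp
  by_cases hcase : p + 1 < s.length
  · have : ((p : Int) + 1 < (arr.length : Int)) := by rw [hlen]; exact_mod_cast by omega
    rw [if_pos this]
    have : ((p : Int) + 1) = ((p + 1 : Nat) : Int) := by push_cast; ring
    rw [this, PySem.List.pyGetD_natCast]
    exact he (p + 1) hcase
  · have hpl : p + 1 = s.length := by omega
    have : ¬ ((p : Int) + 1 < (arr.length : Int)) := by rw [hlen]; exact_mod_cast by omega
    rw [if_neg this, hpl, List.drop_length]
    cases q with
    | nil => exact absurd rfl hq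
    | cons a q' => simp [pvCnt]

theorem pvH_magic (s : List Char) :
    pvH s [] ((PySem.List.pyRange 0 ((s.length : Int) + 1) 1).map (fun _ => (1 : Int))) := by
  intro p hp
  have hlen : ((PySem.List.pyRange 0 ((s.length : Int) + 1) 1).map (fun _ => (1 : Int))).length
      = s.length + 1 := by
    simp [PySem.List.length_pyRange_one]
  have hcond : ((p : Int) + 1 < ((s.length + 1 : Nat) : Int)) := by exact_mod_cast by omega
  rw [hlen] at *
  rw [if_pos (by exact_mod_cast hcond)]
  rw [PySem.List.pyGetD_map_pyRange_of_nonneg _ _ _ _ (by positivity) (by exact_mod_cast hcond)]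
  simp [pvCnt]

theorem pv_drop_last (pl : List Char) (last : Char) (h : pl.getLast? = some last) :
    pl.drop (pl.length - 1) = [last] := by
  rcases List.eq_nil_or_concat pl with h1 | ⟨ys, x, h1⟩
  · subst h1; simp at h
  · subst h1
    rw [List.concat_eq_append] at h ⊢
    have hx : x = last := by
      rw [List.getLast?_concat] at h
      simpa using h
    subst hx
    have hlen : (ys ++ [x]).length - 1 = ys.length := by simp
    rw [hlen, List.drop_left]

theorem count_A_eq_pvCnt (substring string : String) (hp : substring.toList ≠ []) :
    count_matches_smart substring string = pvCnt substring.toList string.toList := by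
  unfold count_matches_smart
  set sl := string.toList with hsl
  set pl := substring.toList with hpl
  by_cases hs : sl = []
  · rw [if_pos hs, hs, pvCnt_eq_zero_or_one_nil, if_neg hp]
  · rw [if_neg hs]
    have hlast : PySem.List.pyGet? pl (-1) = pl.getLast? := PySem.List.pyGet?_neg_one pl
    obtain ⟨last, hl2⟩ : ∃ last, pl.getLast? = some last :=
      Option.ne_none_iff_exists'.mp (by simp [hp])
    rw [hlast, hl2]
    simp only []
    set m := pl.length with hm
    have hm1 : 1 ≤ m := by
      rw [hm]
      exact List.length_pos_iff.mpr hp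
    set d0 : PySem.Dict (List Char) (List Int) :=
      (PySem.Dict.empty).insert [last] (pvFindLetterMatches last sl) with hd0
    set F := (fun (d : PySem.Dict (List Char) (List Int)) (i : Int) =>
        d.insert (PySem.List.slice pl (some i) none)
          (pvFindSuffixMatches (PySem.List.slice pl (some i) none) sl
            (d.getD (PySem.List.slice (PySem.List.slice pl (some i) none) (some 1) none) []))) with hF
    have hrange : PySem.List.pyRange (-2) (-(m : Int) - 1) (-1)
        = (List.range (m - 1)).map (fun k : Nat => (-2 : Int) - (k : Int)) := by
      rw [PySem.List.pyRange_neg_one]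
      have h2 : ((-2 : Int) - (-(m : Int) - 1)).toNat = m - 1 := by omega
      rw [h2]
    have haux : ∀ k, k ≤ m - 1 →
        pvGood sl (pl.drop (m - 1 - k))
          (((List.range k).foldl (fun d (j : Nat) => F d ((-2 : Int) - (j : Int))) d0).getD
            (pl.drop (m - 1 - k)) []) := by
      intro k
      induction k with
      | zero =>
        intro _
        rw [List.range_zero, List.foldl_nil, Nat.sub_zero, hd0]
        rw [pv_drop_last pl last hl2, PySem.Dict.getD_insert, if_pos rfl]
        unfold pvFindLetterMatches
        exact pvFSM_good last [] sl _ (pvH_magic sl)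
      | succ k ihk =>
        intro hk
        have hk2 : k + 2 ≤ m := by omega
        obtain ⟨glen, gelem⟩ := ihk (by omega)
        rw [List.range_succ, List.foldl_append]
        set dk := (List.range k).foldl (fun d (j : Nat) => F d ((-2 : Int) - (j : Int))) d0 with hdk
        simp only [List.foldl_cons, List.foldl_nil, hF]
        have hslice : PySem.List.slice pl (some (-2 - (k : Int))) none = pl.drop (m - (k + 2)) := by
          have : (-2 - (k : Int)) = -((k + 2 : Nat) : Int) := by push_cast; ring
          rw [this, PySem.List.slice_from_neg_natCast pl (k + 2) (by omega), hm]
        have htail : PySem.List.slice (pl.drop (m - (k + 2))) (some 1) none = pl.drop (m - 1 - k) := by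
          rw [PySem.List.slice_from_one, List.tail_drop]
          congr 1
          omega
        rw [hslice, htail]
        have hkey : pl.drop (m - 1 - k) ≠ [] := by
          rw [Ne, List.drop_eq_nil_iff, ← hm]
          omega
        have hgood : pvGood sl (pl.drop (m - 1 - k)) (dk.getD (pl.drop (m - 1 - k)) []) := ⟨glen, gelem⟩
        have hH := pvGood_to_H sl _ _ hkey hgood
        have hidx : m - (k + 2) < pl.length := by omega
        have hsplit : pl.drop (m - (k + 2)) = pl[m - (k + 2)] :: pl.drop (m - 1 - k) := by
          have harith : m - (k + 2) + 1 = m - 1 - k := by omega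
          rw [List.drop_eq_getElem_cons hidx, harith]
        have hgood2 := pvFSM_good (pl[m - (k + 2)]) (pl.drop (m - 1 - k)) sl _ hH
        rw [← hsplit] at hgood2
        have hdrop : m - 1 - (k + 1) = m - (k + 2) := by omega
        rw [hdrop, PySem.Dict.getD_insert, if_pos rfl]
        exact hgood2
    obtain ⟨flen, felem⟩ := haux (m - 1) le_rfl
    rw [hrange, List.foldl_map]
    have hfin : pl.drop (m - 1 - (m - 1)) = pl := by simp
    rw [hfin] at felem
    have h0 : 0 < sl.length := List.length_pos_iff.mpr hs
    have hval := felem 0 h0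
    rw [List.drop_zero] at hval
    rw [PySem.List.pyGetD_zero]
    exact hval

-- ===== VERDICT =====
theorem count_matches_smart_spec : Claim_equal_count_matches_smart := by
  intro substring string _ hpre
  unfold Spec_count_matches_smart
  have hp : substring.toList ≠ [] := by
    intro h
    exact hpre (String.toList_eq_nil_iff.mp h)
  rw [count_A_eq_pvCnt substring string hp, count_B_eq_pvCnt]
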